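-- pv_equiv track=rewrite | github.com/askiki12/24_SE1 | 软件工程与计算/作业/python/lab06_no_test/src/test27.py | feline_fixes
-- ===== SOURCE A (Python) =====
-- def sphinx_swap(start, goal, limit):
--     """A diff function for autocorrect that determines how many letters
--     in START need to be substituted to create GOAL, then adds the difference in
--     their lengths.
--
--     >>> big_limit = 10
--     >>> sphinx_swap("car", "cad", big_limit)
--     1
--     >>> sphinx_swap("this", "that", big_limit)
--     2
--     >>> sphinx_swap("one", "two", big_limit)
--     3
--     >>> sphinx_swap("awful", "awesome", 3) > 3
--     True
--     >>> sphinx_swap("awful", "awesome", 4) > 4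
--     True
--     >>> from construct_check import check
--     >>> # ban while or for loops
--     >>> check(HW_SOURCE_FILE, 'missing_digits', ['While', 'For'])
--     True
--     """
--     # BEGIN PROBLEM 6
--     num = 0
--     if len(goal)==0:
--         return len(start)
--     if len(start)==0:
--         return len(goal)
--     if start[0] != goal[0]:
--         return 1+sphinx_swap(start[1:],goal[1:],limit)
--     return sphinx_swap(start[1:],goal[1:],limit)
--
-- def feline_fixes(start, goal, limit):
--     """A diff function that computes the edit distance from START to GOAL.
--
--     >>> big_limit = 10
--     >>> feline_fixes("cats", "scat", big_limit)       # cats -> scats -> scat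
--     2
--     >>> feline_fixes("purng", "purring", big_limit)   # purng -> purrng -> purring
--     2
--     >>> feline_fixes("ckiteus", "kittens", big_limit) # ckiteus -> kiteus -> kitteus -> kittens
--     3
--     >>> limit = 2
--     >>> feline_fixes("ckiteus", "kittens", limit) > limit
--     True
--     >>> sphinx_swap("ckiteusabcdefghijklm", "kittensnopqrstuvwxyz", limit) > limit
--     True
--     """
--     if len(start) == 0 or len(goal) == 0:
--         return abs(len(start) - len(goal))
--     if start[0] == goal[0]:
--         return feline_fixes(start[1:], goal[1:], limit)
--     kiss1 = sphinx_swap(goal[0] + start, goal, limit)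
--     kiss2 = sphinx_swap(start[1:], goal, limit)
--     kiss3 = sphinx_swap(start[1:], goal[1:], limit)
--     theminn = min([kiss1, kiss2, kiss3])
--     if theminn == kiss1:
--         return 1 + feline_fixes(goal[0] + start, goal, limit)
--     elif theminn == kiss2:
--         return 1 + feline_fixes(start[1:], goal, limit)
--     return 1 + feline_fixes(start[1:], goal[1:], limit)
-- ===== SOURCE B (Python) =====
-- def feline_fixes(start, goal, limit):
--     # closed-form mismatch count replaces the recursive sphinx_swap helper,
--     # and the insertion branch recurses directly on (s, g[1:]) without prepending
--     def mm(s, g):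
--         return sum(a != b for a, b in zip(s, g))
--
--     def go(s, g):
--         if not s or not g:
--             return abs(len(s) - len(g))
--         if s[0] == g[0]:
--             return go(s[1:], g[1:])
--         k1 = mm(s, g[1:]) + abs(len(s) + 1 - len(g))
--         k2 = mm(s[1:], g) + abs(len(s) - 1 - len(g))
--         k3 = mm(s[1:], g[1:]) + abs(len(s) - len(g))
--         m = min(k1, k2, k3)
--         if m == k1:
--             return 1 + go(s, g[1:])
--         if m == k2:
--             return 1 + go(s[1:], g)
--         return 1 + go(s[1:], g[1:])
--
--     return go(start, goal)
-- ===== Notes on version B (the rewrite author's own statement) =====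
-- stated objective: faster
-- what changed: The recursive sphinx_swap helper (which re-slices and re-walks both strings for each of the three branch probes) is replaced by a closed-form mismatch count over zip plus the length difference, and the insertion branch recurses directly on (start, goal[1:]) instead of prepending goal[0] and re-matching it.
import Mathlib
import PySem

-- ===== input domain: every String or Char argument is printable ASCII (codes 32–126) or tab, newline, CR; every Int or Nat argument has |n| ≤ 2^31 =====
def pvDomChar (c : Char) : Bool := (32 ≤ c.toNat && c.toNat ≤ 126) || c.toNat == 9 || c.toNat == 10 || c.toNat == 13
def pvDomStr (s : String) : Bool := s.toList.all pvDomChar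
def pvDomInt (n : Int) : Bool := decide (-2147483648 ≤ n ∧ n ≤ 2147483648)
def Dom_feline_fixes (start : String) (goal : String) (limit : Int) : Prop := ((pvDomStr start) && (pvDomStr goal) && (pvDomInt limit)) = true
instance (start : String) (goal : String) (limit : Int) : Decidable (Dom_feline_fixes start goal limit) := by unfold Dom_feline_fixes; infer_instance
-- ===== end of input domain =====

-- B replaces the recursive sphinx_swap probe by a closed-form mismatch count (zip) plus the
-- length difference, and the insertion branch recurses on (start, goal[1:]) without prepending;
-- objective: faster (a timing run measured B faster; each greedy step becomes linear).

-- ===== PORT A =====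
-- sphinx_swap: counts substitutions in the overlap recursively, then adds the length difference
def pvSphinx : List Char → List Char → Int → Int
  | s, [], _ => (s.length : Int)
  | [], g, _ => (g.length : Int)
  | a :: s', b :: g', limit =>
    if a ≠ b then 1 + pvSphinx s' g' limit else pvSphinx s' g' limit

-- termination measure for A's greedy recursion (the kiss1 call grows the input by one but
-- its heads are then equal, so 'heads differ' pays an extra 3)
def pvMuA : List Char → List Char → Nat
  | a :: s', b :: g' => 2 * (s'.length + g'.length) + 4 + (if a = b then 0 else 3)
  | s, g => 2 * (s.length + g.length)

def pvFelineA : List Char → List Char → Int → Int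
  | [], g, _ => (((0 : Int) - (g.length : Int)).natAbs : Int)
  | a :: s', [], _ => ((((a :: s').length : Int) - 0).natAbs : Int)
  | a :: s', b :: g', limit =>
    if a = b then pvFelineA s' g' limit
    else
      let kiss1 := pvSphinx (b :: a :: s') (b :: g') limit
      let kiss2 := pvSphinx s' (b :: g') limit
      let kiss3 := pvSphinx s' g' limit
      let theminn := min kiss1 (min kiss2 kiss3)
      if theminn = kiss1 then 1 + pvFelineA (b :: a :: s') (b :: g') limit
      else if theminn = kiss2 then 1 + pvFelineA s' (b :: g') limit
      else 1 + pvFelineA s' g' limit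
termination_by s g _ => pvMuA s g
decreasing_by
  all_goals cases s' <;> cases g' <;>
    simp only [pvMuA, List.length_cons, List.length_nil] <;>
    split_ifs <;> simp_all <;> omega

def feline_fixes (start : String) (goal : String) (limit : Int) : Int :=
  pvFelineA start.toList goal.toList limit

-- ===== PORT B =====
-- mm(s, g) = sum(a != b for a, b in zip(s, g))
def pvMM : List Char → List Char → Int
  | a :: s', b :: g' => (if a ≠ b then (1 : Int) else 0) + pvMM s' g'
  | _, _ => 0

def pvFelineB : List Char → List Char → Int
  | [], g => (((0 : Int) - (g.length : Int)).natAbs : Int)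
  | a :: s', [] => ((((a :: s').length : Int) - 0).natAbs : Int)
  | a :: s', b :: g' =>
    if a = b then pvFelineB s' g'
    else
      let k1 := pvMM (a :: s') g' + ((((a :: s').length : Int) + 1) - ((b :: g').length : Int)).natAbs
      let k2 := pvMM s' (b :: g') + ((((a :: s').length : Int) - 1) - ((b :: g').length : Int)).natAbs
      let k3 := pvMM s' g' + (((a :: s').length : Int) - ((b :: g').length : Int)).natAbs
      let m := min k1 (min k2 k3)
      if m = k1 then 1 + pvFelineB (a :: s') g'
      else if m = k2 then 1 + pvFelineB s' (b :: g')
      else 1 + pvFelineB s' g'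
termination_by s g => s.length + g.length

def feline_fixes_alt (start : String) (goal : String) (limit : Int) : Int :=
  pvFelineB start.toList goal.toList

-- ===== PRECONDITION & SPEC =====
def Spec_feline_fixes (start : String) (goal : String) (limit : Int) (out : Int) : Prop := out = feline_fixes_alt start goal limit
instance (start : String) (goal : String) (limit : Int) (out : Int) : Decidable (Spec_feline_fixes start goal limit out) := by unfold Spec_feline_fixes; infer_instance

-- ===== CLAIM (what is proved, stated in full; the proofs are below) =====
def Claim_equal_feline_fixes : Prop := ∀ (start : String) (goal : String) (limit : Int), Dom_feline_fixes start goal limit → Spec_feline_fixes start goal limit (feline_fixes start goal limit)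

-- ===== LEMMAS AND PROOFS =====

-- A's sphinx_swap equals B's closed form: mismatch count plus length difference
lemma pvSphinx_eq_mm (s : List Char) : ∀ (g : List Char) (limit : Int),
    pvSphinx s g limit = pvMM s g + (((s.length : Int) - (g.length : Int)).natAbs : Int) := by
  induction s with
  | nil =>
    intro g limit
    cases g with
    | nil => simp only [pvSphinx, pvMM, List.length_nil]; omega
    | cons b g' => simp only [pvSphinx, pvMM, List.length_nil, List.length_cons]; omega
  | cons a s' ih =>
    intro g limit
    cases g with
    | nil => simp only [pvSphinx, pvMM, List.length_nil, List.length_cons]; omega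
    | cons b g' =>
      simp only [pvSphinx, pvMM, ih g' limit, List.length_cons]
      split_ifs with hcond <;> omega

lemma pvFeline_eq (n : Nat) : ∀ (s g : List Char) (limit : Int),
    s.length + g.length ≤ n → pvFelineA s g limit = pvFelineB s g := by
  induction n with
  | zero =>
    intro s g limit h
    cases s <;> cases g <;> simp_all [pvFelineA, pvFelineB]
  | succ n ih =>
    intro s g limit h
    match s, g with
    | [], g => simp [pvFelineA, pvFelineB]
    | a :: s', [] => simp [pvFelineA, pvFelineB]
    | a :: s', b :: g' =>
      have hlen : s'.length + g'.length + 2 ≤ n + 1 := by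
        simpa [Nat.add_assoc, Nat.add_comm, Nat.add_left_comm] using h
      rw [pvFelineA.eq_3, pvFelineB.eq_3]
      by_cases hab : a = b
      · rw [if_pos hab, if_pos hab]
        exact ih s' g' limit (by omega)
      · rw [if_neg hab, if_neg hab]
        have hk1 : pvSphinx (b :: a :: s') (b :: g') limit
            = pvMM (a :: s') g' + ((((a :: s').length : Int) + 1) - ((b :: g').length : Int)).natAbs := by
          rw [pvSphinx_eq_mm]
          simp only [pvMM, List.length_cons, ne_eq, not_true_eq_false, ite_false]
          omega
        have hk2 : pvSphinx s' (b :: g') limit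
            = pvMM s' (b :: g') + ((((a :: s').length : Int) - 1) - ((b :: g').length : Int)).natAbs := by
          rw [pvSphinx_eq_mm]
          simp only [List.length_cons]
          omega
        have hk3 : pvSphinx s' g' limit
            = pvMM s' g' + (((a :: s').length : Int) - ((b :: g').length : Int)).natAbs := by
          rw [pvSphinx_eq_mm]
          simp only [List.length_cons]
          omega
        have hA1 : pvFelineA (b :: a :: s') (b :: g') limit = pvFelineB (a :: s') g' := by
          rw [pvFelineA.eq_3, if_pos rfl]
          exact ih (a :: s') g' limit (by simp only [List.length_cons]; omega)
        have hA2 : pvFelineA s' (b :: g') limit = pvFelineB s' (b :: g') :=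
          ih s' (b :: g') limit (by simp only [List.length_cons]; omega)
        have hA3 : pvFelineA s' g' limit = pvFelineB s' g' :=
          ih s' g' limit (by omega)
        simp only [hk1, hk2, hk3, hA1, hA2, hA3]

-- ===== VERDICT (by name: the statement is the Claim_ definition above) =====
theorem feline_fixes_spec : Claim_equal_feline_fixes := by
  intro start goal limit _
  unfold Spec_feline_fixes feline_fixes feline_fixes_alt
  exact pvFeline_eq (start.toList.length + goal.toList.length) _ _ _ le_rfl
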